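-- pv_equiv track=rewrite | github.com/camel-ai/crab | crab/actions/visual_prompt_actions.py | remove_invalid_boxes
-- ===== SOURCE A (Python) =====
-- def remove_invalid_boxes(boxes_with_label, width, height):
--     boxes = [box[0] for box in boxes_with_label]
--     boxes_to_remove = set()
--     for idx, box in enumerate(boxes):
--         if box[0] < 0 or box[1] < 0 or box[2] > width or box[3] > height:
--             boxes_to_remove.add(idx)
--             continue
--         if box[0] >= box[2] or box[1] >= box[3]:
--             boxes_to_remove.add(idx)
--             continue
--
--     boxes_filt = [
--         box for idx, box in enumerate(boxes_with_label) if idx not in boxes_to_remove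
--     ]
--     return boxes_filt
-- ===== SOURCE B (Python) =====
-- def remove_invalid_boxes(boxes_with_label, width, height):
--     result = []
--     for item in boxes_with_label:
--         box = item[0]
--         if box[0] < 0 or box[1] < 0 or box[2] > width or box[3] > height:
--             continue
--         if box[0] >= box[2] or box[1] >= box[3]:
--             continue
--         result.append(item)
--     return result
-- ===== Notes on version B (the rewrite author's own statement) =====
-- stated objective: simpler
-- what changed: Replaces A's three passes (extract boxes, build a removal index set, filter by index) with one direct-accumulation pass that appends each valid item as it is seen.
import Mathlib
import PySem

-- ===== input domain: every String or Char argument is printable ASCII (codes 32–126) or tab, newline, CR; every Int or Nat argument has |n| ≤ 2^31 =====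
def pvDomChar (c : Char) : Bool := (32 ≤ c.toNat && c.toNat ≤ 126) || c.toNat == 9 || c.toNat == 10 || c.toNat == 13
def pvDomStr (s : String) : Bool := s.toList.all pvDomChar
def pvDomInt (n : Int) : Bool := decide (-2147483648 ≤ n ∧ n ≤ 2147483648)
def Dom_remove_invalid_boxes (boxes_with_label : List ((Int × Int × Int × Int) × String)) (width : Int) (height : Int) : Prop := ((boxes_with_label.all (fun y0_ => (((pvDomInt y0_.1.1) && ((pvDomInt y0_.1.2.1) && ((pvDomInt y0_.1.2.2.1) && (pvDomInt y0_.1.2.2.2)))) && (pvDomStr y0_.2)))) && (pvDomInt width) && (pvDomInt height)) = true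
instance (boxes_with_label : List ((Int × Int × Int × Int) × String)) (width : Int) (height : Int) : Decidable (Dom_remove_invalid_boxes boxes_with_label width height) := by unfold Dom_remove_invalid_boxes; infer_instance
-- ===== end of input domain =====

-- B replaces A's three passes (extract boxes, build a removal index set, filter by index) with one direct-accumulation pass; objective: simpler.

-- ===== PORT A =====
-- Port of A: extract boxes, build the removal index set, then filter by index.
def remove_invalid_boxes (boxes_with_label : List ((Int × Int × Int × Int) × String)) (width : Int) (height : Int) : List ((Int × Int × Int × Int) × String) :=
  let boxes := boxes_with_label.map (fun box => box.1)
  let boxes_to_remove : PySem.Set Int :=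
    (PySem.List.enumerate boxes).foldl (fun s p =>
      let idx := p.1
      let box := p.2
      if box.1 < 0 ∨ box.2.1 < 0 ∨ box.2.2.1 > width ∨ box.2.2.2 > height then
        PySem.Set.add s idx
      else if box.1 ≥ box.2.2.1 ∨ box.2.1 ≥ box.2.2.2 then
        PySem.Set.add s idx
      else s) PySem.Set.empty
  ((PySem.List.enumerate boxes_with_label).filter
      (fun p => !(PySem.Set.contains boxes_to_remove p.1))).map (fun p => p.2)

-- ===== PORT B =====
-- Port of B: one direct-accumulation pass over boxes_with_label.
def remove_invalid_boxes_alt (boxes_with_label : List ((Int × Int × Int × Int) × String)) (width : Int) (height : Int) : List ((Int × Int × Int × Int) × String) :=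
  match boxes_with_label with
  | [] => []
  | item :: rest =>
    let box := item.1
    if box.1 < 0 ∨ box.2.1 < 0 ∨ box.2.2.1 > width ∨ box.2.2.2 > height then
      remove_invalid_boxes_alt rest width height
    else if box.1 ≥ box.2.2.1 ∨ box.2.1 ≥ box.2.2.2 then
      remove_invalid_boxes_alt rest width height
    else
      item :: remove_invalid_boxes_alt rest width height

-- ===== PRECONDITION & SPEC =====
def Spec_remove_invalid_boxes (boxes_with_label : List ((Int × Int × Int × Int) × String)) (width : Int) (height : Int) (out : List ((Int × Int × Int × Int) × String)) : Prop := out = remove_invalid_boxes_alt boxes_with_label width height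
instance (boxes_with_label : List ((Int × Int × Int × Int) × String)) (width : Int) (height : Int) (out : List ((Int × Int × Int × Int) × String)) : Decidable (Spec_remove_invalid_boxes boxes_with_label width height out) := by unfold Spec_remove_invalid_boxes; infer_instance

-- ===== CLAIM (what is proved, stated in full; the proofs are below) =====
def Claim_equal_remove_invalid_boxes : Prop := ∀ (boxes_with_label : List ((Int × Int × Int × Int) × String)) (width : Int) (height : Int), Dom_remove_invalid_boxes boxes_with_label width height → Spec_remove_invalid_boxes boxes_with_label width height (remove_invalid_boxes boxes_with_label width height)

-- ===== LEMMAS AND PROOFS =====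

-- the validity predicate both programs decide, per box
def pvBad (width height : Int) (box : Int × Int × Int × Int) : Bool :=
  decide (box.1 < 0 ∨ box.2.1 < 0 ∨ box.2.2.1 > width ∨ box.2.2.2 > height)
    || decide (box.1 ≥ box.2.2.1 ∨ box.2.1 ≥ box.2.2.2)

theorem alt_eq_filter (boxes_with_label : List ((Int × Int × Int × Int) × String)) (width height : Int) :
    remove_invalid_boxes_alt boxes_with_label width height
      = boxes_with_label.filter (fun it => !pvBad width height it.1) := by
  induction boxes_with_label with
  | nil => rfl
  | cons item rest ih =>
    simp only [remove_invalid_boxes_alt]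
    by_cases c1 : item.1.1 < 0 ∨ item.1.2.1 < 0 ∨ item.1.2.2.1 > width ∨ item.1.2.2.2 > height
    · simp [List.filter_cons, pvBad, c1, ih]
      omega
    · by_cases c2 : item.1.1 ≥ item.1.2.2.1 ∨ item.1.2.1 ≥ item.1.2.2.2
      · simp [List.filter_cons, pvBad, c1, c2, ih]
        omega
      · simp [List.filter_cons, pvBad, c1, c2, ih]
        omega

theorem mem_removeSet (width height : Int) (xs : List (Int × Int × Int × Int)) (idx : Int) :
    ∀ (s : Int) (S : PySem.Set Int),
    (idx ∈ (PySem.List.enumerate xs s).foldl (fun s p =>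
      let idx := p.1
      let box := p.2
      if box.1 < 0 ∨ box.2.1 < 0 ∨ box.2.2.1 > width ∨ box.2.2.2 > height then
        PySem.Set.add s idx
      else if box.1 ≥ box.2.2.1 ∨ box.2.1 ≥ box.2.2.2 then
        PySem.Set.add s idx
      else s) S)
    ↔ idx ∈ S ∨ ∃ (k : Nat) (h : k < xs.length), idx = s + k ∧ pvBad width height xs[k] = true := by
  induction xs with
  | nil => intro s S; simp [PySem.List.enumerate_nil]
  | cons x xs ih =>
    intro s S
    rw [PySem.List.enumerate_cons, List.foldl_cons]
    have hstep : (let idx := (s, x).1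
        let box := (s, x).2
        if box.1 < 0 ∨ box.2.1 < 0 ∨ box.2.2.1 > width ∨ box.2.2.2 > height then
          PySem.Set.add S idx
        else if box.1 ≥ box.2.2.1 ∨ box.2.1 ≥ box.2.2.2 then
          PySem.Set.add S idx
        else S)
        = (if x.1 < 0 ∨ x.2.1 < 0 ∨ x.2.2.1 > width ∨ x.2.2.2 > height then PySem.Set.add S s
           else if x.1 ≥ x.2.2.1 ∨ x.2.1 ≥ x.2.2.2 then PySem.Set.add S s else S) := rfl
    rw [hstep, ih]
    have hmem : idx ∈ (if x.1 < 0 ∨ x.2.1 < 0 ∨ x.2.2.1 > width ∨ x.2.2.2 > height then PySem.Set.add S s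
           else if x.1 ≥ x.2.2.1 ∨ x.2.1 ≥ x.2.2.2 then PySem.Set.add S s else S)
        ↔ idx ∈ S ∨ (idx = s ∧ pvBad width height x = true) := by
      by_cases c1 : x.1 < 0 ∨ x.2.1 < 0 ∨ x.2.2.1 > width ∨ x.2.2.2 > height
      · simp [c1, PySem.Set.mem_add, pvBad]
      · by_cases c2 : x.1 ≥ x.2.2.1 ∨ x.2.1 ≥ x.2.2.2
        · simp [c1, c2, PySem.Set.mem_add, pvBad]
        · simp [c1, c2, pvBad]
    rw [hmem]
    constructor
    · rintro ((hm | ⟨rfl, hb⟩) | ⟨k, hk, rfl, hb⟩)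
      · exact Or.inl hm
      · exact Or.inr ⟨0, by simp, by simp, by simpa using hb⟩
      · exact Or.inr ⟨k + 1, by simpa using hk, by push_cast; ring, by simpa using hb⟩
    · rintro (hm | ⟨k, hk, rfl, hb⟩)
      · exact Or.inl (Or.inl hm)
      · cases k with
        | zero => exact Or.inl (Or.inr ⟨by simp, by simpa using hb⟩)
        | succ k =>
          exact Or.inr ⟨k, by simpa using hk, by push_cast; ring, by simpa using hb⟩

theorem filter_enum {α : Type} (xs : List α) (s : Int) (q : Int → Bool) (r : α → Bool)
    (hq : ∀ (k : Nat) (h : k < xs.length), q (s + k) = r xs[k]) :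
    ((PySem.List.enumerate xs s).filter (fun p => q p.1)).map (fun p => p.2)
      = xs.filter r := by
  induction xs generalizing s with
  | nil => simp [PySem.List.enumerate_nil]
  | cons x xs ih =>
    rw [PySem.List.enumerate_cons]
    have h0 : q s = r x := by simpa using hq 0 (by simp)
    have hrec := ih (s + 1) (fun k hk => by
      have := hq (k + 1) (by simpa using hk)
      rw [show s + 1 + (k : Int) = s + ((k : Nat) + 1 : Nat) by push_cast; ring]
      simpa using this)
    simp only [List.filter_cons, h0]
    by_cases hr : r x = true
    · simp [hr, hrec]
    · simp only [Bool.not_eq_true] at hr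
      simp [hr, hrec]

-- ===== VERDICT (by name: the statement is the Claim_ definition above) =====
theorem remove_invalid_boxes_spec : Claim_equal_remove_invalid_boxes := by
  intro bwl width height _
  unfold Spec_remove_invalid_boxes
  rw [alt_eq_filter]
  have hq : ∀ (k : Nat) (h : k < bwl.length),
      (!(PySem.Set.contains ((PySem.List.enumerate (bwl.map (fun box => box.1))).foldl (fun s p =>
        let idx := p.1
        let box := p.2
        if box.1 < 0 ∨ box.2.1 < 0 ∨ box.2.2.1 > width ∨ box.2.2.2 > height then
          PySem.Set.add s idx
        else if box.1 ≥ box.2.2.1 ∨ box.2.1 ≥ box.2.2.2 then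
          PySem.Set.add s idx
        else s) PySem.Set.empty) ((0 : Int) + k)))
      = (!pvBad width height bwl[k].1) := by
    intro k hk
    have hmem := mem_removeSet width height (bwl.map (fun box => box.1)) ((0 : Int) + k) 0 PySem.Set.empty
    have hiff : ((0 : Int) + k) ∈ ((PySem.List.enumerate (bwl.map (fun box => box.1))).foldl (fun s p =>
        let idx := p.1
        let box := p.2
        if box.1 < 0 ∨ box.2.1 < 0 ∨ box.2.2.1 > width ∨ box.2.2.2 > height then
          PySem.Set.add s idx
        else if box.1 ≥ box.2.2.1 ∨ box.2.1 ≥ box.2.2.2 then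
          PySem.Set.add s idx
        else s) PySem.Set.empty)
        ↔ pvBad width height bwl[k].1 = true := by
      rw [hmem]
      constructor
      · rintro (hm | ⟨j, hj, hjk, hb⟩)
        · simp [PySem.Set.empty] at hm
        · have : j = k := by omega
          subst this
          simpa using hb
      · intro hb
        exact Or.inr ⟨k, by simpa using hk, by ring, by simpa using hb⟩
    have hceq : PySem.Set.contains ((PySem.List.enumerate (bwl.map (fun box => box.1))).foldl (fun s p =>
        let idx := p.1
        let box := p.2
        if box.1 < 0 ∨ box.2.1 < 0 ∨ box.2.2.1 > width ∨ box.2.2.2 > height then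
          PySem.Set.add s idx
        else if box.1 ≥ box.2.2.1 ∨ box.2.1 ≥ box.2.2.2 then
          PySem.Set.add s idx
        else s) PySem.Set.empty) ((0 : Int) + k) = pvBad width height bwl[k].1 := by
      rw [Bool.eq_iff_iff, PySem.Set.contains_iff]
      exact hiff
    rw [hceq]
  exact filter_enum bwl 0 (fun i => !(PySem.Set.contains ((PySem.List.enumerate (bwl.map (fun box => box.1))).foldl (fun s p =>
      let idx := p.1
      let box := p.2
      if box.1 < 0 ∨ box.2.1 < 0 ∨ box.2.2.1 > width ∨ box.2.2.2 > height then
        PySem.Set.add s idx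
      else if box.1 ≥ box.2.2.1 ∨ box.2.1 ≥ box.2.2.2 then
        PySem.Set.add s idx
      else s) PySem.Set.empty) i)) (fun it => !pvBad width height it.1) hq
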